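-- pv_equiv track=rewrite | github.com/green-fox-academy/Chiflado | week-03/day-04/bunny2.py | ears_of_bunnies_and_mutant_bunnies
-- ===== SOURCE A (Python) =====
-- def ears_of_bunnies_and_mutant_bunnies(bunnies):
--     if bunnies == 1:
--         return 2
--     elif bunnies == 0:
--         return 0
--     elif bunnies % 2 == 0:
--         return 3 + (ears_of_bunnies_and_mutant_bunnies(bunnies - 1))
--     else:
--         return 2 + (ears_of_bunnies_and_mutant_bunnies(bunnies - 1))
-- ===== SOURCE B (Python) =====
-- def ears_of_bunnies_and_mutant_bunnies(bunnies):
--     # closed form: odd-indexed bunnies have 2 ears, even-indexed have 3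
--     return 2 * bunnies + bunnies // 2
-- ===== Notes on version B (the rewrite author's own statement) =====
-- stated objective: faster
-- what changed: Replaced the linear recursion (adding three ears at even positions and two at odd ones down to the base case) by a single closed-form arithmetic expression.
import Mathlib
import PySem

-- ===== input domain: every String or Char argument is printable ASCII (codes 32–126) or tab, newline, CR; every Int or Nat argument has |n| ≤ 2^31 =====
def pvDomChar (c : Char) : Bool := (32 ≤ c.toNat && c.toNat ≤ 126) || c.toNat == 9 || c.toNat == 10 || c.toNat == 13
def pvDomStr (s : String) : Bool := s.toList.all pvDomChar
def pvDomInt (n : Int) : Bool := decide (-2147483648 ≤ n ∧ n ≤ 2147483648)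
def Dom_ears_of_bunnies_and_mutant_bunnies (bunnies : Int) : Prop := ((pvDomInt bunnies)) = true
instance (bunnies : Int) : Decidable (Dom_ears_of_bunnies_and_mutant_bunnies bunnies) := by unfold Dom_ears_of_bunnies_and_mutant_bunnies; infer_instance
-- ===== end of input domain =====

-- B replaces A's linear recursion by the closed form 2*n + n//2 (objective: faster, O(1)).
-- ===== PORT A =====
-- A recurses on bunnies - 1 until 1 or 0; on bunnies >= 0 (Pre_) this is recursion on bunnies.toNat.
def earsA_go : Nat -> Int
  | 0 => 0
  | 1 => 2
  | (n+2) => if ((n : Int) + 2) % 2 = 0 then 3 + earsA_go (n+1) else 2 + earsA_go (n+1)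

def ears_of_bunnies_and_mutant_bunnies (bunnies : Int) : Int := earsA_go bunnies.toNat

-- ===== PORT B =====
def ears_of_bunnies_and_mutant_bunnies_alt (bunnies : Int) : Int :=
  2 * bunnies + PySem.Int.floordiv bunnies 2

-- ===== PRECONDITION & SPEC =====
-- Pre_ excludes bunnies < 0, where A recurses forever (RecursionError).
def Pre_ears_of_bunnies_and_mutant_bunnies (bunnies : Int) : Prop := 0 <= bunnies
instance (bunnies : Int) : Decidable (Pre_ears_of_bunnies_and_mutant_bunnies bunnies) := by unfold Pre_ears_of_bunnies_and_mutant_bunnies; infer_instance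
def pvWitness_ears_of_bunnies_and_mutant_bunnies : Int := 5


def Spec_ears_of_bunnies_and_mutant_bunnies (bunnies : Int) (out : Int) : Prop := out = ears_of_bunnies_and_mutant_bunnies_alt bunnies
instance (bunnies : Int) (out : Int) : Decidable (Spec_ears_of_bunnies_and_mutant_bunnies bunnies out) := by unfold Spec_ears_of_bunnies_and_mutant_bunnies; infer_instance

-- ===== CLAIM (what is proved, stated in full; the proofs are below) =====
def Claim_equal_ears_of_bunnies_and_mutant_bunnies : Prop := ∀ (bunnies : Int), Dom_ears_of_bunnies_and_mutant_bunnies bunnies → Pre_ears_of_bunnies_and_mutant_bunnies bunnies → Spec_ears_of_bunnies_and_mutant_bunnies bunnies (ears_of_bunnies_and_mutant_bunnies bunnies)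

-- ===== LEMMAS AND PROOFS =====
theorem earsA_go_closed (n : Nat) : earsA_go n = 2 * (n : Int) + ((n / 2 : Nat) : Int) := by
  induction n with
  | zero => decide
  | succ m ih =>
    match m with
    | 0 => decide
    | k+1 =>
      rw [earsA_go]
      rw [ih]
      by_cases h : (k + 2) % 2 = 0
      · have hc : ((k : Int) + 2) % 2 = 0 := by omega
        rw [if_pos hc]
        have h2 : (k + 2) / 2 = k / 2 + 1 := by omega
        have h1 : (k + 1) / 2 = k / 2 := by omega
        push_cast [h2, h1]; ring
      · have hc : ¬ ((k : Int) + 2) % 2 = 0 := by omega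
        rw [if_neg hc]
        have h2 : (k + 2) / 2 = (k + 1) / 2 := by omega
        push_cast [h2]; ring


-- ===== VERDICT (by name: the statement is the Claim_ definition above) =====
theorem ears_of_bunnies_and_mutant_bunnies_spec : Claim_equal_ears_of_bunnies_and_mutant_bunnies := by
  intro b _ hpre
  unfold Spec_ears_of_bunnies_and_mutant_bunnies ears_of_bunnies_and_mutant_bunnies ears_of_bunnies_and_mutant_bunnies_alt
  rw [earsA_go_closed]
  rw [PySem.Int.floordiv_eq_ediv_of_pos (by omega)]
  unfold Pre_ears_of_bunnies_and_mutant_bunnies at hpre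
  have h1 : (b.toNat : Int) = b := Int.toNat_of_nonneg hpre
  have h2 : ((b.toNat / 2 : Nat) : Int) = b / 2 := by omega
  rw [h1, h2]
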